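-- pv_equiv track=rewrite | github.com/dauvannam1804/DSA | bitmask/Samu_and_her_Birthday_Party.py | count_min_dishes
-- ===== SOURCE A (Python) =====
-- def count_min_dishes(n, k, friend_likes):
--     friend_masks = []
--     for like in friend_likes:
--         mask = 0
--         for i, c in enumerate(like):
--             if c == '1':
--                 mask |= (1 << i)
--         friend_masks.append(mask)
--
--     min_dish_count = k  # tối đa K món
--     for subset in range(1, 1 << k):  # duyệt tất cả các tập món ăn
--         valid = True
--         for friend_mask in friend_masks:
--             if (friend_mask & subset) == 0:
--                 valid = False
--                 break
--         if valid:
--             dish_count = bin(subset).count('1')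
--             min_dish_count = min(min_dish_count, dish_count)
--     return min_dish_count
-- ===== SOURCE B (Python) =====
-- def count_min_dishes(n, k, friend_likes):
--     # Transposed view: dish_hits[j] = bitmask of FRIENDS who like dish j.
--     # A dish subset s feeds everyone iff the union of dish_hits[j] over the
--     # bits j of s covers all friends, so validity is k OR-steps per subset
--     # instead of a scan over all n friends.
--     full = (1 << len(friend_likes)) - 1
--     dish_hits = [0] * k
--     for i, like in enumerate(friend_likes):
--         for j, c in enumerate(like):
--             if j < k and c == '1':
--                 dish_hits[j] |= 1 << i
--     best = k
--     for s in range(1, 1 << k):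
--         agg = 0
--         for j in range(k):
--             if (s >> j) & 1:
--                 agg |= dish_hits[j]
--         if agg == full:
--             best = min(best, s.bit_count())
--     return best
-- ===== Notes on version B (the rewrite author's own statement) =====
-- stated objective: alternative
-- what changed: A tests each of the 2^k dish subsets by scanning all n friend masks; B transposes the data into a dish->friends incidence table (dish_hits[j] = bitmask of friends who like dish j) and tests a subset by OR-ing the friend sets of its k dishes and comparing with the all-friends mask, so per-subset work is k table ORs instead of a scan over the n friends.
import Mathlib
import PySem

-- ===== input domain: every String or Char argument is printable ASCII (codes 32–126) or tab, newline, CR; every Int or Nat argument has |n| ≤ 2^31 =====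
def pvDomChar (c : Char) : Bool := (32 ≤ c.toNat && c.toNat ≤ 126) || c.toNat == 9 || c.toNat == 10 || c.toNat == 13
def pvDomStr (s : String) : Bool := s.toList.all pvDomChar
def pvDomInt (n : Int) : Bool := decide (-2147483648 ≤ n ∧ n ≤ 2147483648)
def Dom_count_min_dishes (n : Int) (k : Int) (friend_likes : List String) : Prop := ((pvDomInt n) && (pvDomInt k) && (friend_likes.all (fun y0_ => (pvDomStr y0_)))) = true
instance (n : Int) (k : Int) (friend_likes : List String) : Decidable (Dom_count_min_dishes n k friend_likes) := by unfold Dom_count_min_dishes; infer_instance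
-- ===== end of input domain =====

-- B replaces A's per-subset scan over the n friend masks by a transposed dish→friends
-- incidence table: a subset is valid iff the union of the friend sets of its dishes is
-- everybody (objective: alternative — a different algorithm over transposed data, similar cost).

-- ===== PORT A =====
-- '1 << i' is '(1:Int) <<< (i.toNat : Int)' (exact: the enumerate index i is ≥ 0); '1 << k'
-- likewise, exact under Pre_ (0 ≤ k); "bin(subset).count('1')" is PySem.Int.bitCount (the
-- '1'-count of bin(m) is the popcount of |m|, which is exactly bitCount).
def count_min_dishes (n : Int) (k : Int) (friend_likes : List String) : Int :=
  let friend_masks := friend_likes.foldl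
    (fun friend_masks like =>
      let mask := (PySem.List.enumerate like.toList 0).foldl
        (fun mask ic => if ic.2 = '1' then PySem.Int.bor mask ((1:Int) <<< (ic.1.toNat : Int)) else mask) 0
      friend_masks ++ [mask]) []
  (PySem.List.pyRange 1 ((1:Int) <<< (k.toNat : Int)) 1).foldl
    (fun min_dish_count subset =>
      if friend_masks.all (fun friend_mask => PySem.Int.band friend_mask subset != 0) then
        min min_dish_count ((PySem.Int.bitCount subset : Nat) : Int)
      else min_dish_count) k

-- ===== PORT B =====
-- '[0] * k' is List.replicate k.toNat 0 (Python's negative repeat gives [], as toNat does);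
-- 'dish_hits[j]' is '.getD j.toNat 0' and 'dish_hits[j] |= …' is '.set j.toNat …' — exact:
-- the guard 'jc.1 < k' / the range bound keep 0 ≤ j < k = len(dish_hits), so the access is
-- always in range; '(s >> j) & 1' is 'PySem.Int.band (s >>> (j.toNat : Int)) 1' (j from
-- range(k) is ≥ 0); 's.bit_count()' is PySem.Int.bitCount; '1 << …' as in port A.
def count_min_dishes_alt (n : Int) (k : Int) (friend_likes : List String) : Int :=
  let full : Int := ((1:Int) <<< (friend_likes.length : Int)) - 1
  let dish_hits : List Int := (PySem.List.enumerate friend_likes 0).foldl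
    (fun dish_hits il =>
      (PySem.List.enumerate il.2.toList 0).foldl
        (fun dish_hits jc =>
          if jc.1 < k ∧ jc.2 = '1' then
            dish_hits.set jc.1.toNat (PySem.Int.bor (dish_hits.getD jc.1.toNat 0) ((1:Int) <<< (il.1.toNat : Int)))
          else dish_hits) dish_hits)
    (List.replicate k.toNat 0)
  (PySem.List.pyRange 1 ((1:Int) <<< (k.toNat : Int)) 1).foldl
    (fun best s =>
      let agg := (PySem.List.pyRange 0 k 1).foldl
        (fun agg j =>
          if PySem.Int.band (s >>> (j.toNat : Int)) 1 ≠ 0 then PySem.Int.bor agg (dish_hits.getD j.toNat 0)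
          else agg) 0
      if agg = full then min best ((PySem.Int.bitCount s : Nat) : Int) else best) k

-- ===== PRECONDITION & SPEC =====
-- Pre_ excludes exactly k < 0, where Python A raises ValueError on '1 << k'.
def Pre_count_min_dishes (n : Int) (k : Int) (friend_likes : List String) : Prop := 0 ≤ k
instance (n : Int) (k : Int) (friend_likes : List String) : Decidable (Pre_count_min_dishes n k friend_likes) := by unfold Pre_count_min_dishes; infer_instance

def pvWitness_count_min_dishes : Int × Int × List String := (2, 2, ["10", "01"])

def Spec_count_min_dishes (n : Int) (k : Int) (friend_likes : List String) (out : Int) : Prop := out = count_min_dishes_alt n k friend_likes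
instance (n : Int) (k : Int) (friend_likes : List String) (out : Int) : Decidable (Spec_count_min_dishes n k friend_likes out) := by unfold Spec_count_min_dishes; infer_instance

-- ===== CLAIM (what is proved, stated in full; the proofs are below) =====
def Claim_equal_count_min_dishes : Prop := ∀ (n : Int) (k : Int) (friend_likes : List String), Dom_count_min_dishes n k friend_likes → Pre_count_min_dishes n k friend_likes → Spec_count_min_dishes n k friend_likes (count_min_dishes n k friend_likes)

-- ===== LEMMAS AND PROOFS =====

-- Nat-level mask of a char list (bits = indices of '1' characters, offset p).
def pvM : List Char → Nat → Nat
  | [], _ => 0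
  | c :: cs, p => (if c = '1' then 2^p else 0) ||| pvM cs (p+1)

theorem pvM_testBit (cs : List Char) (p j : Nat) :
    (pvM cs p).testBit j = true ↔ ∃ t, cs[t]? = some '1' ∧ j = p + t := by
  induction cs generalizing p with
  | nil => simp [pvM]
  | cons c cs ih =>
    simp only [pvM, Nat.testBit_or, Bool.or_eq_true, ih]
    constructor
    · rintro (h | ⟨t, ht, rfl⟩)
      · split at h
        · next hc =>
          rw [Nat.testBit_two_pow] at h
          have hp : p = j := of_decide_eq_true h
          exact ⟨0, by simp [hc], by omega⟩
        · simp at h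
      · exact ⟨t+1, by simpa using ht, by omega⟩
    · rintro ⟨t, ht, rfl⟩
      cases t with
      | zero =>
        left
        simp at ht
        simp [ht]
      | succ t =>
        right
        exact ⟨t, by simpa using ht, by omega⟩

-- Nat-level dish→friends incidence: bit (i + position of cs) set iff that friend likes dish j.
def pvH : List (List Char) → Nat → Nat → Nat
  | [], _, _ => 0
  | cs :: rest, i, j => (if cs[j]? = some '1' then 2^i else 0) ||| pvH rest (i+1) j

theorem pvH_testBit (Ls : List (List Char)) (i j t : Nat) :
    (pvH Ls i j).testBit t = true ↔ ∃ u cs, Ls[u]? = some cs ∧ cs[j]? = some '1' ∧ t = i + u := by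
  induction Ls generalizing i with
  | nil => simp [pvH]
  | cons cs rest ih =>
    simp only [pvH, Nat.testBit_or, Bool.or_eq_true, ih]
    constructor
    · rintro (h | ⟨u, cs', h1, h2, rfl⟩)
      · split at h
        · next hc =>
          rw [Nat.testBit_two_pow] at h
          have hi : i = t := of_decide_eq_true h
          exact ⟨0, cs, by simp, hc, by omega⟩
        · simp at h
      · exact ⟨u+1, cs', by simpa using h1, h2, by omega⟩
    · rintro ⟨u, cs', h1, h2, rfl⟩
      cases u with
      | zero =>
        left
        simp at h1
        subst h1
        simp [h2]
      | succ u =>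
        right
        exact ⟨u, cs', by simpa using h1, h2, by omega⟩

theorem pvLand_ne_zero_iff (m n : Nat) :
    m &&& n ≠ 0 ↔ ∃ i, m.testBit i = true ∧ n.testBit i = true := by
  constructor
  · intro h
    by_contra hc
    push Not at hc
    apply h
    apply Nat.eq_of_testBit_eq
    intro i
    have := hc i
    rw [Nat.testBit_and]
    cases hm : m.testBit i <;> cases hn : n.testBit i <;> simp_all
  · rintro ⟨i, hm, hn⟩ h
    have := Nat.testBit_and m n i
    rw [h, hm, hn] at this
    simp at this

theorem pvTestBit_lt (s' K j : Nat) (h1 : s' < 2^K) (h2 : s'.testBit j = true) : j < K := by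
  by_contra hc
  rw [Nat.testBit_lt_two_pow (lt_of_lt_of_le h1 (Nat.pow_le_pow_right (by norm_num) (by omega)))] at h2
  simp at h2

-- A's per-friend mask fold equals the cast of pvM.
theorem pvMaskA_eq (cs : List Char) (p m : Nat) :
    (PySem.List.enumerate cs (p:Int)).foldl
      (fun mask ic => if ic.2 = '1' then PySem.Int.bor mask ((1:Int) <<< (ic.1.toNat : Int)) else mask) ((m:Nat) : Int)
    = ((m ||| pvM cs p : Nat) : Int) := by
  induction cs generalizing p m with
  | nil => simp [pvM, PySem.List.enumerate_nil]
  | cons c cs ih =>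
    rw [PySem.List.enumerate_cons]
    have hcast : ((p:Int) + 1) = (((p+1 : Nat)) : Int) := by push_cast; ring
    have hacc : (if (((p:Int),c)).2 = '1' then PySem.Int.bor ((m:Nat):Int) ((1:Int) <<< (((((p:Int),c)).1.toNat : Nat) : Int)) else ((m:Nat):Int))
        = (((m ||| (if c = '1' then 2^p else 0) : Nat)):Int) := by
      by_cases hc : c = '1'
      · simp only [hc, if_pos, Int.toNat_natCast, Int.one_shiftLeft]
        simp
        rw [← PySem.Int.bor_natCast]
        norm_cast
      · simp [hc]
    rw [List.foldl_cons, hacc, hcast, ih]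
    congr 1
    simp [pvM, Nat.or_assoc]

theorem pvMaskA_eq0 (cs : List Char) :
    (PySem.List.enumerate cs 0).foldl
      (fun mask ic => if ic.2 = '1' then PySem.Int.bor mask ((1:Int) <<< (ic.1.toNat : Int)) else mask) (0 : Int)
    = ((pvM cs 0 : Nat) : Int) := by
  have := pvMaskA_eq cs 0 0
  simpa using this

-- B's inner (per-friend) loop over the characters, pointwise.
theorem pvInner (k : Int) (iv : Int) (cs : List Char) (p : Nat) (dh : List Int) :
    (((PySem.List.enumerate cs (p:Int)).foldl
      (fun dish_hits jc =>
        if jc.1 < k ∧ jc.2 = '1' then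
          dish_hits.set jc.1.toNat (PySem.Int.bor (dish_hits.getD jc.1.toNat 0) iv)
        else dish_hits) dh).length = dh.length)
    ∧ ∀ q : Nat, ((PySem.List.enumerate cs (p:Int)).foldl
      (fun dish_hits jc =>
        if jc.1 < k ∧ jc.2 = '1' then
          dish_hits.set jc.1.toNat (PySem.Int.bor (dish_hits.getD jc.1.toNat 0) iv)
        else dish_hits) dh).getD q 0
      = if p ≤ q ∧ (q:Int) < k ∧ q < dh.length ∧ cs[q - p]? = some '1'
        then PySem.Int.bor (dh.getD q 0) iv else dh.getD q 0 := by
  induction cs generalizing p dh with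
  | nil =>
    constructor
    · simp [PySem.List.enumerate_nil]
    · intro q
      simp [PySem.List.enumerate_nil]
  | cons c cs ih =>
    rw [PySem.List.enumerate_cons]
    have hcast : ((p:Int) + 1) = (((p+1 : Nat)) : Int) := by push_cast; ring
    simp only [List.foldl_cons]
    set dh' := (if ((p:Int),c).1 < k ∧ ((p:Int),c).2 = '1' then
        dh.set ((p:Int),c).1.toNat (PySem.Int.bor (dh.getD ((p:Int),c).1.toNat 0) iv)
      else dh) with hdh'
    have hlen' : dh'.length = dh.length := by
      rw [hdh']; split <;> simp
    have hget' : ∀ q : Nat, dh'.getD q 0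
        = if q = p ∧ (p:Int) < k ∧ p < dh.length ∧ c = '1'
          then PySem.Int.bor (dh.getD p 0) iv else dh.getD q 0 := by
      intro q
      rw [hdh']
      by_cases hc : (p:Int) < k ∧ c = '1'
      · rw [if_pos (by simpa using hc)]
        simp only [Int.toNat_natCast]
        by_cases hq : q = p
        · subst hq
          by_cases hlt : q < dh.length
          · rw [if_pos ⟨rfl, hc.1, hlt, hc.2⟩]
            simp [List.getD, hlt]
          · rw [if_neg (by tauto)]
            simp [List.getD, hlt]
        · rw [if_neg (by tauto)]
          simp [List.getD, List.getElem?_set_ne (by omega : p ≠ q)]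
      · rw [if_neg (by simpa using hc)]
        rw [if_neg (by tauto)]
    obtain ⟨ihlen, ihget⟩ := ih (p+1) dh'
    rw [hcast]
    constructor
    · rw [ihlen, hlen']
    · intro q
      rw [ihget q, hlen']
      by_cases hq : q = p
      · subst hq
        rw [if_neg (by omega)]
        rw [hget']
        by_cases hc2 : ((q:Int)) < k ∧ q < dh.length ∧ c = '1'
        · rw [if_pos ⟨rfl, hc2.1, hc2.2.1, hc2.2.2⟩]
          rw [if_pos ⟨le_refl q, hc2.1, hc2.2.1, by simp [hc2.2.2]⟩]
        · rw [if_neg (by tauto)]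
          rw [if_neg (by rintro ⟨_, h1, h2, h3⟩; simp at h3; exact hc2 ⟨h1, h2, h3⟩)]
      · by_cases hple : p + 1 ≤ q
        · have hidx : (c :: cs)[q - p]? = cs[q - (p+1)]? := by
            have h5 : q - p = (q - (p+1)) + 1 := by omega
            rw [h5]
            simp
          have h6 : dh'.getD q 0 = dh.getD q 0 := by rw [hget', if_neg (by tauto)]
          rw [h6, hidx]
          by_cases hcond : (q:Int) < k ∧ q < dh.length ∧ cs[q - (p+1)]? = some '1'
          · rw [if_pos ⟨hple, hcond.1, hcond.2.1, hcond.2.2⟩, if_pos ⟨by omega, hcond.1, hcond.2.1, hcond.2.2⟩]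
          · rw [if_neg (by tauto), if_neg (by tauto)]
        · rw [if_neg (by omega), hget', if_neg (by tauto), if_neg (by omega)]

-- B's outer (over the friends) loop: dish_hits is pointwise the pvH table.
theorem pvOuter (k : Int) (Ls : List String) (i0 : Nat) (g : Nat → Nat) :
    (PySem.List.enumerate Ls (i0:Int)).foldl
      (fun dish_hits il =>
        (PySem.List.enumerate il.2.toList 0).foldl
          (fun dish_hits jc =>
            if jc.1 < k ∧ jc.2 = '1' then
              dish_hits.set jc.1.toNat (PySem.Int.bor (dish_hits.getD jc.1.toNat 0) ((1:Int) <<< (il.1.toNat : Int)))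
            else dish_hits) dish_hits)
      ((List.range k.toNat).map (fun q => ((g q : Nat) : Int)))
    = (List.range k.toNat).map (fun q => ((g q ||| pvH (Ls.map (fun x => x.toList)) i0 q : Nat) : Int)) := by
  induction Ls generalizing i0 g with
  | nil => simp [PySem.List.enumerate_nil, pvH]
  | cons like rest ih =>
    rw [PySem.List.enumerate_cons]
    simp only [List.foldl_cons]
    have hcast : ((i0:Int) + 1) = (((i0+1 : Nat)) : Int) := by push_cast; ring
    have hstep : (PySem.List.enumerate (((i0:Int)), like).2.toList 0).foldl
        (fun dish_hits jc =>
          if jc.1 < k ∧ jc.2 = '1' then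
            dish_hits.set jc.1.toNat (PySem.Int.bor (dish_hits.getD jc.1.toNat 0) ((1:Int) <<< (((((i0:Int)), like)).1.toNat : Int)))
          else dish_hits)
        ((List.range k.toNat).map (fun q => ((g q : Nat) : Int)))
        = (List.range k.toNat).map (fun q => ((g q ||| (if like.toList[q]? = some '1' then 2^i0 else 0) : Nat) : Int)) := by
      dsimp only
      obtain ⟨hl, hg⟩ := pvInner k ((1:Int) <<< ((((i0:Int)).toNat : Nat) : Int)) like.toList 0
        ((List.range k.toNat).map (fun q => ((g q : Nat) : Int)))
      simp only [Nat.cast_zero] at hl hg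
      apply List.ext_getElem
      · rw [hl]; simp
      · intro q hq1 hq2
        have hq : q < k.toNat := by simpa using hq2
        have e1 : ∀ (xs : List Int) (h : q < xs.length), xs[q] = xs.getD q 0 := by
          intro xs h
          simp [List.getD, List.getElem?_eq_getElem h]
        rw [e1 _ hq1, e1 _ hq2, hg q]
        have hmap : ((List.range k.toNat).map (fun q => ((g q : Nat) : Int))).getD q 0 = ((g q : Nat) : Int) := by
          simp [List.getD, hq]
        have hmaplen : ((List.range k.toNat).map (fun q => ((g q : Nat) : Int))).length = k.toNat := by simp
        rw [hmaplen, hmap]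
        have hq' : ((q:Int)) < k := by
          omega
        have hmap2 : ((List.range k.toNat).map (fun q => ((g q ||| (if like.toList[q]? = some '1' then 2^i0 else 0) : Nat) : Int))).getD q 0
            = ((g q ||| (if like.toList[q]? = some '1' then 2^i0 else 0) : Nat) : Int) := by
          simp [List.getD, hq]
        rw [hmap2]
        by_cases hone : like.toList[q - 0]? = some '1'
        · rw [if_pos ⟨by omega, hq', hq, hone⟩]
          simp only [Int.toNat_natCast, Int.one_shiftLeft]
          rw [← PySem.Int.bor_natCast]
          simp at hone
          simp [hone]
        · rw [if_neg (by tauto)]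
          simp only [Nat.sub_zero] at hone
          simp [hone]
    rw [hstep, hcast, ih (i0+1) (fun q => g q ||| (if like.toList[q]? = some '1' then 2^i0 else 0))]
    apply List.map_congr_left
    intro q _
    congr 1
    simp [pvH, Nat.or_assoc]

-- Bool/testBit reading of the Nat-level agg accumulation.
theorem pvAggBits (l : List Nat) (s' : Nat) (h : Nat → Nat) (a : Nat) (t : Nat) :
    ((l.foldl (fun a j => if s'.testBit j then a ||| h j else a) a).testBit t = true)
    ↔ (a.testBit t = true ∨ ∃ j ∈ l, s'.testBit j = true ∧ (h j).testBit t = true) := by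
  induction l generalizing a with
  | nil => simp
  | cons j l ih =>
    simp only [List.foldl_cons, ih]
    by_cases hj : s'.testBit j = true
    · rw [if_pos hj]
      simp only [Nat.testBit_or, Bool.or_eq_true]
      constructor
      · rintro (( h1 | h1) | h1)
        · exact Or.inl h1
        · exact Or.inr ⟨j, by simp, hj, h1⟩
        · obtain ⟨j', hj1, hj2⟩ := h1
          exact Or.inr ⟨j', by simp [hj1], hj2⟩
      · rintro (h1 | ⟨j', hj1, hj2, hj3⟩)
        · exact Or.inl (Or.inl h1)
        · rcases List.mem_cons.mp hj1 with h | h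
          · subst h; exact Or.inl (Or.inr hj3)
          · exact Or.inr ⟨j', h, hj2, hj3⟩
    · rw [if_neg hj]
      constructor
      · rintro (h1 | ⟨j', hj1, hj2, hj3⟩)
        · exact Or.inl h1
        · exact Or.inr ⟨j', by simp [hj1], hj2, hj3⟩
      · rintro (h1 | ⟨j', hj1, hj2, hj3⟩)
        · exact Or.inl h1
        · rcases List.mem_cons.mp hj1 with h | h
          · subst h; exact absurd hj2 hj
          · exact Or.inr ⟨j', h, hj2, hj3⟩

-- B's agg loop, cast to the Nat level (dh is the pvH-table map).
theorem pvAggEq (k : Int) (h : Nat → Nat) (s' : Nat) :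
    (PySem.List.pyRange 0 k 1).foldl
      (fun agg j =>
        if PySem.Int.band (((s':Nat):Int) >>> (j.toNat : Int)) 1 ≠ 0 then
          PySem.Int.bor agg (((List.range k.toNat).map (fun q => ((h q : Nat) : Int))).getD j.toNat 0)
        else agg) (0:Int)
    = (((List.range k.toNat).foldl (fun a j => if s'.testBit j then a ||| h j else a) 0 : Nat) : Int) := by
  rw [PySem.List.pyRange_zero, List.foldl_map]
  have key : ∀ (l : List Nat) (a : Nat), (∀ j ∈ l, j < k.toNat) →
      l.foldl (fun (agg : Int) (j : Nat) =>
        if PySem.Int.band (((s':Nat):Int) >>> ((((j:Int)).toNat : Nat) : Int)) 1 ≠ 0 then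
          PySem.Int.bor agg (((List.range k.toNat).map (fun q => ((h q : Nat) : Int))).getD ((j:Int)).toNat 0)
        else agg) ((a:Nat):Int)
      = ((l.foldl (fun a j => if s'.testBit j then a ||| h j else a) a : Nat) : Int) := by
    intro l
    induction l with
    | nil => intro a _; simp
    | cons j l ihl =>
      intro a hmem
      have hj : j < k.toNat := hmem j (by simp)
      simp only [List.foldl_cons, Int.toNat_natCast]
      have hcond : (PySem.Int.band (((s':Nat):Int) >>> ((j:Nat):Int)) 1 ≠ 0) ↔ s'.testBit j = true := by
        rw [Int.shiftRight_natCast]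
        have h1 : ((1:Int)) = ((1:Nat):Int) := by norm_cast
        rw [h1, PySem.Int.band_natCast]
        rw [Nat.and_one_is_mod]
        simp only [ne_eq, Int.natCast_eq_zero]
        rw [Nat.testBit, Nat.one_and_eq_mod_two]
        simp only [bne_iff_ne, ne_eq]
      have hget : (((List.range k.toNat).map (fun q => ((h q : Nat) : Int))).getD j 0) = ((h j : Nat) : Int) := by
        simp [List.getD, hj]
      by_cases hb : s'.testBit j = true
      · rw [if_pos (hcond.mpr hb), hget, PySem.Int.bor_natCast, if_pos hb]
        exact ihl _ (fun x hx => hmem x (by simp [hx]))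
      · rw [if_neg (fun hc => hb (hcond.mp hc)), if_neg hb]
        exact ihl _ (fun x hx => hmem x (by simp [hx]))
  have h0 : ((0:Int)) = ((0:Nat):Int) := by norm_cast
  rw [h0]
  exact key (List.range k.toNat) 0 (by simp)

-- The two validity tests agree for 0 < s' < 2^k.
theorem pvCondEquiv (K : Nat) (Ls : List (List Char)) (s' : Nat) (hs : s' < 2^K) :
    ((List.range K).foldl (fun a j => if s'.testBit j then a ||| pvH Ls 0 j else a) 0) = 2^Ls.length - 1
    ↔ (∀ cs ∈ Ls, pvM cs 0 &&& s' ≠ 0) := by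
  constructor
  · intro h cs hcs
    obtain ⟨u, hu, hcseq⟩ := List.getElem_of_mem hcs
    have hbit : ((List.range K).foldl (fun a j => if s'.testBit j then a ||| pvH Ls 0 j else a) 0).testBit u = true := by
      rw [h, Nat.testBit_two_pow_sub_one]
      simpa using hu
    rw [pvAggBits] at hbit
    rcases hbit with h1 | ⟨j, _, hj2, hj3⟩
    · simp at h1
    · rw [pvH_testBit] at hj3
      obtain ⟨u', cs', hc1, hc2, hc3⟩ := hj3
      have hu' : u' = u := by omega
      subst hu'
      rw [List.getElem?_eq_getElem hu, hcseq] at hc1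
      have hcc : cs = cs' := by simpa using hc1
      subst hcc
      rw [pvLand_ne_zero_iff]
      refine ⟨j, ?_, hj2⟩
      rw [pvM_testBit]
      exact ⟨j, hc2, by omega⟩
  · intro h
    apply Nat.eq_of_testBit_eq
    intro t
    rw [Nat.testBit_two_pow_sub_one]
    by_cases ht : t < Ls.length
    · have hcs := h (Ls[t]) (List.getElem_mem ht)
      rw [pvLand_ne_zero_iff] at hcs
      obtain ⟨j, hj1, hj2⟩ := hcs
      rw [pvM_testBit] at hj1
      obtain ⟨t', hj3, hj4⟩ := hj1
      have hjt : j = t' := by omega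
      subst hjt
      have hjK : j < K := pvTestBit_lt s' K j hs hj2
      rw [(by simp [ht] : decide (t < Ls.length) = true)]
      rw [pvAggBits]
      right
      refine ⟨j, by simp [hjK], hj2, ?_⟩
      rw [pvH_testBit]
      exact ⟨t, Ls[t], List.getElem?_eq_getElem ht, hj3, by omega⟩
    · rw [(by simp [ht] : decide (t < Ls.length) = false)]
      by_contra hc
      have hc' : ((List.range K).foldl (fun a j => if s'.testBit j then a ||| pvH Ls 0 j else a) 0).testBit t = true := by
        cases hb : ((List.range K).foldl (fun a j => if s'.testBit j then a ||| pvH Ls 0 j else a) 0).testBit t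
        · exact absurd hb hc
        · rfl
      rw [pvAggBits] at hc'
      rcases hc' with h1 | ⟨j, _, _, hj3⟩
      · simp at h1
      · rw [pvH_testBit] at hj3
        obtain ⟨u, cs', hc1, _, hc3⟩ := hj3
        have : u < Ls.length := by
          by_contra hcc
          simp [List.getElem?_eq_none (by omega : Ls.length ≤ u)] at hc1
        omega

-- ===== VERDICT (by name: the statement is the Claim_ definition above) =====
theorem count_min_dishes_spec : Claim_equal_count_min_dishes := by
  intro n k friend_likes _ hk
  unfold Spec_count_min_dishes count_min_dishes count_min_dishes_alt
  have hmasks : friend_likes.foldl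
      (fun friend_masks like =>
        friend_masks ++ [(PySem.List.enumerate like.toList 0).foldl
          (fun mask ic => if ic.2 = '1' then PySem.Int.bor mask ((1:Int) <<< (ic.1.toNat : Int)) else mask) 0]) []
      = friend_likes.map (fun like => ((pvM like.toList 0 : Nat) : Int)) := by
    rw [PySem.List.foldl_append_singleton_eq_map]
    simp only [List.nil_append]
    exact List.map_congr_left (fun like _ => pvMaskA_eq0 like.toList)
  have hdish : (PySem.List.enumerate friend_likes 0).foldl
      (fun dish_hits il =>
        (PySem.List.enumerate il.2.toList 0).foldl
          (fun dish_hits jc =>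
            if jc.1 < k ∧ jc.2 = '1' then
              dish_hits.set jc.1.toNat (PySem.Int.bor (dish_hits.getD jc.1.toNat 0) ((1:Int) <<< (il.1.toNat : Int)))
            else dish_hits) dish_hits)
      (List.replicate k.toNat 0)
      = (List.range k.toNat).map (fun q => ((pvH (friend_likes.map (fun x => x.toList)) 0 q : Nat) : Int)) := by
    have h1 := pvOuter k friend_likes 0 (fun _ => 0)
    simp only [Nat.cast_zero, Nat.zero_or] at h1
    rw [← h1]
    congr 1
    simp [List.map_const']
  simp only [hmasks, hdish]
  apply PySem.List.foldl_congr_mem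
  intro acc s hs
  rw [PySem.List.mem_pyRange_one, Int.one_shiftLeft] at hs
  have hscast : s = ((s.toNat : Nat) : Int) := by omega
  have hslt : s.toNat < 2^k.toNat := by omega
  rw [hscast]
  set s' : Nat := s.toNat with hs'
  have hfull : ((1:Int) <<< ((friend_likes.length : Nat) : Int)) - 1
      = ((2^friend_likes.length - 1 : Nat) : Int) := by
    rw [Int.one_shiftLeft, Nat.cast_sub Nat.one_le_two_pow, Nat.cast_one]
  rw [pvAggEq k (fun q => pvH (friend_likes.map (fun x => x.toList)) 0 q) s', hfull]
  have hAiff : ((friend_likes.map (fun like => ((pvM like.toList 0 : Nat) : Int))).all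
        (fun friend_mask => PySem.Int.band friend_mask ((s' : Nat) : Int) != 0) = true)
      ↔ (((List.range k.toNat).foldl
            (fun a j => if s'.testBit j then a ||| pvH (friend_likes.map (fun x => x.toList)) 0 j else a) 0 : Nat)
          = 2^friend_likes.length - 1) := by
    have hlen : (friend_likes.map (fun x => x.toList)).length = friend_likes.length := by simp
    rw [← hlen, pvCondEquiv k.toNat (friend_likes.map (fun x => x.toList)) s' hslt]
    rw [List.all_eq_true]
    constructor
    · intro h cs hcs
      rw [List.mem_map] at hcs
      obtain ⟨like, hl, rfl⟩ := hcs
      have h2 := h _ (List.mem_map_of_mem (f := fun like => ((pvM like.toList 0 : Nat) : Int)) hl)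
      simp only [bne_iff_ne, ne_eq] at h2
      rw [PySem.Int.band_natCast] at h2
      exact_mod_cast h2
    · intro h fm hfm
      rw [List.mem_map] at hfm
      obtain ⟨like, hl, rfl⟩ := hfm
      have h2 := h _ (List.mem_map_of_mem (f := fun x => x.toList) hl)
      simp only [bne_iff_ne, ne_eq]
      rw [PySem.Int.band_natCast]
      exact_mod_cast h2
  have hBiff : ((((List.range k.toNat).foldl
            (fun a j => if s'.testBit j then a ||| pvH (friend_likes.map (fun x => x.toList)) 0 j else a) 0 : Nat) : Int)
          = ((2^friend_likes.length - 1 : Nat) : Int))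
      ↔ (((List.range k.toNat).foldl
            (fun a j => if s'.testBit j then a ||| pvH (friend_likes.map (fun x => x.toList)) 0 j else a) 0 : Nat)
          = 2^friend_likes.length - 1) := Int.natCast_inj
  rw [if_congr (hAiff.trans hBiff.symm) rfl rfl]
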